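-- pv_equiv track=rewrite | github.com/mi-24v/at_coder_contests | abc195/b/main.py | search
-- ===== SOURCE A (Python) =====
-- MAX_COUNT = 1 * 1000 * 1000
--
-- MIN_COUNT = 0
--
-- def search(A :int, B :int, W :int):
--     current_minimum = MAX_COUNT
--     current_maximum = MIN_COUNT
--     for orange_count in range(MAX_COUNT):
--         if orange_count*A <= 1000*W <= orange_count*B:
--             current_minimum = min(current_minimum, orange_count)
--             current_maximum = max(current_maximum, orange_count)
--     if current_maximum == 0:
--         return "UNSATISFIABLE"
--     else:
--         return "{} {}".format(current_minimum, current_maximum)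
-- ===== SOURCE B (Python) =====
-- MAX_COUNT = 1 * 1000 * 1000
--
-- MIN_COUNT = 0
--
-- def search(A: int, B: int, W: int):
--     # O(1): intersect [0, MAX_COUNT-1] with the solution set of n*A <= 1000*W <= n*B,
--     # which is an integer interval obtained by ceil/floor division.
--     T = 1000 * W
--     lo, hi = MIN_COUNT, MAX_COUNT - 1
--     feasible = True
--     if A > 0:
--         hi = min(hi, T // A)
--     elif A == 0:
--         feasible = T >= 0
--     else:
--         lo = max(lo, -((-T) // A))
--     if B > 0:
--         lo = max(lo, -((-T) // B))
--     elif B == 0: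
--         feasible = feasible and T <= 0
--     else:
--         hi = min(hi, T // B)
--     if not feasible or lo > hi or hi == 0:
--         return "UNSATISFIABLE"
--     return "{} {}".format(lo, hi)
-- ===== Notes on version B (the rewrite author's own statement) =====
-- stated objective: faster
-- what changed: Replaces A's brute-force scan of all 1,000,000 candidate orange counts with an O(1) computation of the feasible interval's endpoints by floor/ceiling integer division, intersected with [0, 999999].
import Mathlib
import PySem

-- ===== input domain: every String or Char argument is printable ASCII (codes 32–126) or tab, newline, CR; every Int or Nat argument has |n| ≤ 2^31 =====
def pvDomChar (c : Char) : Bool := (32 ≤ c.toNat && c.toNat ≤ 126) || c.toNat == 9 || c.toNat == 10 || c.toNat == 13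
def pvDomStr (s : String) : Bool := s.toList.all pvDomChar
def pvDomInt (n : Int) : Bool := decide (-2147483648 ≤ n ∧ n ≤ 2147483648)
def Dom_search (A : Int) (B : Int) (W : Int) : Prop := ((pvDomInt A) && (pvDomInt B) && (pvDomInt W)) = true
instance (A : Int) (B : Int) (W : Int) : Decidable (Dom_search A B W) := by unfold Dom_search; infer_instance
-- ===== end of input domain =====

-- B replaces A's scan of all 10^6 candidate counts by an O(1) interval intersection
-- computed with floor/ceil division (objective: faster, asymptotic).

-- ===== PORT A =====
-- literal port of A: scan orange_count over range(1000000), keep running min/max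
def search (A : Int) (B : Int) (W : Int) : String :=
  let s := (PySem.List.pyRange 0 1000000 1).foldl
    (fun s n => if n * A ≤ 1000 * W ∧ 1000 * W ≤ n * B then (min s.1 n, max s.2 n) else s)
    ((1000000 : Int), (0 : Int))
  if s.2 = 0 then "UNSATISFIABLE"
  else PySem.Int.toStr s.1 ++ " " ++ PySem.Int.toStr s.2

-- ===== PORT B =====
-- Source B's first if-chain (on A): updates (lo, hi, feasible) from (0, 999999, True)
def pvStep1 (A : Int) (T : Int) : Int × Int × Bool :=
  if A > 0 then ((0 : Int), min 999999 (PySem.Int.floordiv T A), true)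
  else if A = 0 then ((0 : Int), (999999 : Int), decide (T ≥ 0))
  else (max 0 (-(PySem.Int.floordiv (-T) A)), (999999 : Int), true)

-- Source B's second if-chain (on B)
def pvStep2 (B : Int) (T : Int) (s1 : Int × Int × Bool) : Int × Int × Bool :=
  if B > 0 then (max s1.1 (-(PySem.Int.floordiv (-T) B)), s1.2.1, s1.2.2)
  else if B = 0 then (s1.1, s1.2.1, s1.2.2 && decide (T ≤ 0))
  else (s1.1, min s1.2.1 (PySem.Int.floordiv T B), s1.2.2)

-- literal port of Source B: closed-form interval endpoints by floor/ceil division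
def search_alt (A : Int) (B : Int) (W : Int) : String :=
  let T := 1000 * W
  let s2 := pvStep2 B T (pvStep1 A T)
  if !s2.2.2 || decide (s2.1 > s2.2.1) || decide (s2.2.1 = 0) then "UNSATISFIABLE"
  else PySem.Int.toStr s2.1 ++ " " ++ PySem.Int.toStr s2.2.1

-- ===== PRECONDITION & SPEC =====
def Spec_search (A : Int) (B : Int) (W : Int) (out : String) : Prop := out = search_alt A B W
instance (A : Int) (B : Int) (W : Int) (out : String) : Decidable (Spec_search A B W out) := by unfold Spec_search; infer_instance

-- ===== CLAIM (what is proved, stated in full; the proofs are below) =====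
def Claim_equal_search : Prop := ∀ (A : Int) (B : Int) (W : Int), Dom_search A B W → Spec_search A B W (search A B W)

-- ===== LEMMAS AND PROOFS =====

-- n*d ≤ T  ↔  n ≤ T // d   (d > 0)
theorem pv_le_floor_iff (T d n : Int) (hd : 0 < d) :
    n * d ≤ T ↔ n ≤ PySem.Int.floordiv T d :=
  (PySem.Int.le_floordiv_iff_mul_le hd).symm

-- T ≤ n*d  ↔  -((-T) // d) ≤ n   (d > 0; Python's ceiling division)
theorem pv_ceil_le_iff (T d n : Int) (hd : 0 < d) :
    T ≤ n * d ↔ -(PySem.Int.floordiv (-T) d) ≤ n := by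
  rw [neg_le, PySem.Int.le_floordiv_iff_mul_le hd, neg_mul, neg_le_neg_iff]

-- n*d ≤ T  ↔  -((-T) // d) ≤ n   (d < 0)
theorem pv_neg_le_floor_iff (T d n : Int) (hd : d < 0) :
    n * d ≤ T ↔ -(PySem.Int.floordiv (-T) d) ≤ n := by
  rw [show PySem.Int.floordiv (-T) d = PySem.Int.floordiv T (-d) by
        rw [← PySem.Int.floordiv_neg_neg T (-d), neg_neg]]
  rw [neg_le, PySem.Int.le_floordiv_iff_mul_le (by omega : (0:Int) < -d),
      neg_mul, mul_neg, neg_neg]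

-- T ≤ n*d  ↔  n ≤ T // d   (d < 0)
theorem pv_neg_ceil_le_iff (T d n : Int) (hd : d < 0) :
    T ≤ n * d ↔ n ≤ PySem.Int.floordiv T d := by
  rw [show PySem.Int.floordiv T d = PySem.Int.floordiv (-T) (-d) by
        rw [PySem.Int.floordiv_neg_neg]]
  rw [PySem.Int.le_floordiv_iff_mul_le (by omega : (0:Int) < -d), mul_neg, neg_le_neg_iff]

-- A's fold over range(N) computes the endpoints of the satisfying interval
theorem pv_fold_interval (A B T lo hi : Int) (hlo : 0 ≤ lo)
    (hP : ∀ n : Int, 0 ≤ n → n < 1000000 →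
       ((n * A ≤ T ∧ T ≤ n * B) ↔ (lo ≤ n ∧ n ≤ hi))) :
    ∀ N : Nat, N ≤ 1000000 →
      (PySem.List.pyRange 0 (N : Int) 1).foldl
        (fun s n => if n * A ≤ T ∧ T ≤ n * B then (min s.1 n, max s.2 n) else s)
        ((1000000 : Int), (0 : Int))
      = if lo ≤ hi ∧ lo < (N : Int) then (lo, min hi ((N : Int) - 1))
        else ((1000000 : Int), (0 : Int)) := by
  intro N
  induction N with
  | zero =>
    intro _
    rw [PySem.List.pyRange_one_eq_nil (by norm_num)]
    simp only [List.foldl_nil]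
    rw [if_neg (by omega)]
  | succ N ih =>
    intro hN
    have hN' : (N : Int) ≤ 1000000 := by exact_mod_cast Nat.le_of_succ_le hN
    have hcast : ((N + 1 : Nat) : Int) = (N : Int) + 1 := by push_cast; ring
    rw [hcast, PySem.List.pyRange_one_succ_right (by positivity),
        List.foldl_append, ih (Nat.le_of_succ_le hN)]
    have hPN := hP (N : Int) (by positivity) (by omega)
    by_cases hpn : (N : Int) * A ≤ T ∧ T ≤ (N : Int) * B
    · have hlh : lo ≤ (N : Int) ∧ (N : Int) ≤ hi := hPN.mp hpn
      by_cases hprev : lo ≤ hi ∧ lo < (N : Int)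
      · rw [if_pos hprev]
        simp only [List.foldl_cons, List.foldl_nil, if_pos hpn]
        rw [if_pos (by omega)]
        refine Prod.ext ?_ ?_ <;> simp <;> omega
      · rw [if_neg hprev]
        simp only [List.foldl_cons, List.foldl_nil, if_pos hpn]
        rw [if_pos (by omega)]
        refine Prod.ext ?_ ?_ <;> simp <;> omega
    · have hlh : ¬ (lo ≤ (N : Int) ∧ (N : Int) ≤ hi) := fun h => hpn (hPN.mpr h)
      simp only [List.foldl_cons, List.foldl_nil, if_neg hpn]
      by_cases hprev : lo ≤ hi ∧ lo < (N : Int)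
      · rw [if_pos hprev, if_pos (by omega)]
        refine Prod.ext ?_ ?_ <;> simp <;> omega
      · rw [if_neg hprev, if_neg (by omega)]

-- A's whole body, expressed through the interval endpoints
theorem pv_search_eq (A B W lo hi : Int) (hlo : 0 ≤ lo) (hhi : hi ≤ 999999)
    (hP : ∀ n : Int, 0 ≤ n → n < 1000000 →
       ((n * A ≤ 1000 * W ∧ 1000 * W ≤ n * B) ↔ (lo ≤ n ∧ n ≤ hi))) :
    search A B W = if lo ≤ hi ∧ hi ≠ 0
      then PySem.Int.toStr lo ++ " " ++ PySem.Int.toStr hi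
      else "UNSATISFIABLE" := by
  unfold search
  have h := pv_fold_interval A B (1000 * W) lo hi hlo hP 1000000 (le_refl _)
  norm_num at h
  rw [h]
  by_cases hle : lo ≤ hi ∧ lo < 1000000
  · rw [if_pos hle]
    have hmin : min hi (999999 : Int) = hi := by omega
    rw [hmin]
    by_cases hz : hi = 0
    · subst hz
      rw [if_pos rfl, if_neg (by omega : ¬ (lo ≤ (0:Int) ∧ (0:Int) ≠ 0))]
    · rw [if_neg hz, if_pos (show lo ≤ hi ∧ hi ≠ 0 from ⟨hle.1, hz⟩)]
  · rw [if_neg hle, if_neg (by omega : ¬ (lo ≤ hi ∧ hi ≠ 0))]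
    norm_num

-- B's whole body, expressed through the computed triple
theorem pv_alt_spec (A B W lo hi : Int) (feas : Bool)
    (hs : pvStep2 B (1000 * W) (pvStep1 A (1000 * W)) = (lo, hi, feas)) :
    search_alt A B W = if !feas || decide (lo > hi) || decide (hi = 0)
      then "UNSATISFIABLE"
      else PySem.Int.toStr lo ++ " " ++ PySem.Int.toStr hi := by
  have h2 : search_alt A B W =
      (if (!(pvStep2 B (1000*W) (pvStep1 A (1000*W))).2.2
          || decide ((pvStep2 B (1000*W) (pvStep1 A (1000*W))).1 > (pvStep2 B (1000*W) (pvStep1 A (1000*W))).2.1)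
          || decide ((pvStep2 B (1000*W) (pvStep1 A (1000*W))).2.1 = 0)) then "UNSATISFIABLE"
        else PySem.Int.toStr (pvStep2 B (1000*W) (pvStep1 A (1000*W))).1 ++ " "
          ++ PySem.Int.toStr (pvStep2 B (1000*W) (pvStep1 A (1000*W))).2.1) := rfl
  rw [h2, hs]

-- the two if-shapes agree when the computation is feasible …
theorem pv_out_true (lo hi : Int) (s : String) :
    (if lo ≤ hi ∧ hi ≠ 0 then s else "UNSATISFIABLE")
      = if !true || decide (lo > hi) || decide (hi = 0) then "UNSATISFIABLE" else s := by
  by_cases h1 : lo ≤ hi <;> by_cases h2 : hi = 0 <;> simp [h1, h2]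

-- … and an infeasible run prints UNSATISFIABLE
theorem pv_out_false (lo hi : Int) (s : String) :
    "UNSATISFIABLE"
      = if !false || decide (lo > hi) || decide (hi = 0) then "UNSATISFIABLE" else s := by
  simp

-- ===== VERDICT (by name: the statement is the Claim_ definition above) =====
theorem search_spec : Claim_equal_search := by
  intro A B W _
  unfold Spec_search
  rcases lt_trichotomy 0 A with hA | hA | hA
  · -- A > 0
    rcases lt_trichotomy 0 B with hB | hB | hB
    · -- B > 0
      rw [pv_alt_spec A B W (max 0 (-(PySem.Int.floordiv (-(1000*W)) B)))
            (min 999999 (PySem.Int.floordiv (1000*W) A)) true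
            (by simp [pvStep1, pvStep2, hA, hB]),
          pv_search_eq A B W (max 0 (-(PySem.Int.floordiv (-(1000*W)) B))) (min 999999 (PySem.Int.floordiv (1000*W) A)) (by omega) (by omega)
            (by intro n hn hn'
                rw [pv_le_floor_iff (1000*W) A n hA, pv_ceil_le_iff (1000*W) B n hB]
                omega),
          pv_out_true]
    · -- B = 0
      subst hB
      by_cases hTle : 1000 * W ≤ 0
      · rw [pv_alt_spec A 0 W 0 (min 999999 (PySem.Int.floordiv (1000*W) A)) true
              (by simp [pvStep1, pvStep2, hA, hTle]),
            pv_search_eq A 0 W 0 (min 999999 (PySem.Int.floordiv (1000*W) A)) (le_refl _) (by omega)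
              (by intro n hn hn'
                  rw [pv_le_floor_iff (1000*W) A n hA]
                  constructor
                  · rintro ⟨h, _⟩; exact ⟨hn, by omega⟩
                  · rintro ⟨_, h⟩; exact ⟨by omega, by simpa using hTle⟩),
            pv_out_true]
      · rw [pv_alt_spec A 0 W 0 (min 999999 (PySem.Int.floordiv (1000*W) A)) false
              (by simp [pvStep1, pvStep2, hA]; omega),
            pv_search_eq A 0 W 1 0 (by omega) (by omega)
              (by intro n hn hn'
                  constructor
                  · rintro ⟨_, h⟩; simp at h; omega
                  · rintro ⟨h1, h2⟩; omega),
            if_neg (by omega : ¬ ((1:Int) ≤ 0 ∧ (0:Int) ≠ 0)), ← pv_out_false]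
    · -- B < 0
      rw [pv_alt_spec A B W 0
            (min (min 999999 (PySem.Int.floordiv (1000*W) A)) (PySem.Int.floordiv (1000*W) B)) true
            (by simp [pvStep1, pvStep2, hA, show ¬ B > 0 by omega, show ¬ B = 0 by omega]),
          pv_search_eq A B W 0 (min (min 999999 (PySem.Int.floordiv (1000*W) A)) (PySem.Int.floordiv (1000*W) B)) (le_refl _) (by omega)
            (by intro n hn hn'
                rw [pv_le_floor_iff (1000*W) A n hA, pv_neg_ceil_le_iff (1000*W) B n hB]
                omega),
          pv_out_true]
  · -- A = 0
    subst hA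
    rcases lt_trichotomy 0 B with hB | hB | hB
    · by_cases hTge : 0 ≤ 1000 * W
      · rw [pv_alt_spec 0 B W (max 0 (-(PySem.Int.floordiv (-(1000*W)) B))) 999999 true
              (by simp [pvStep1, pvStep2, hB, hTge]),
            pv_search_eq 0 B W (max 0 (-(PySem.Int.floordiv (-(1000*W)) B))) 999999 (by omega) (le_refl _)
              (by intro n hn hn'
                  rw [pv_ceil_le_iff (1000*W) B n hB]
                  constructor
                  · rintro ⟨_, h⟩; exact ⟨by omega, by omega⟩
                  · rintro ⟨h, _⟩; exact ⟨by simpa using hTge, by omega⟩),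
            pv_out_true]
      · rw [pv_alt_spec 0 B W (max 0 (-(PySem.Int.floordiv (-(1000*W)) B))) 999999 false
              (by simp [pvStep1, pvStep2, hB]; omega),
            pv_search_eq 0 B W 1 0 (by omega) (by omega)
              (by intro n hn hn'
                  constructor
                  · rintro ⟨h, _⟩; simp at h; omega
                  · rintro ⟨h1, h2⟩; omega),
            if_neg (by omega : ¬ ((1:Int) ≤ 0 ∧ (0:Int) ≠ 0)), ← pv_out_false]
    · -- B = 0
      subst hB
      by_cases hT0 : 1000 * W = 0
      · rw [pv_alt_spec 0 0 W 0 999999 true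
              (by simp [pvStep1, pvStep2]; omega),
            pv_search_eq 0 0 W 0 999999 (le_refl _) (le_refl _)
              (by intro n hn hn'; simp [hT0]; omega),
            pv_out_true]
      · rw [pv_alt_spec 0 0 W 0 999999 false
              (by simp [pvStep1, pvStep2]; omega),
            pv_search_eq 0 0 W 1 0 (by omega) (by omega)
              (by intro n hn hn'
                  constructor
                  · rintro ⟨h1, h2⟩; simp at h1 h2; omega
                  · rintro ⟨h1, h2⟩; omega),
            if_neg (by omega : ¬ ((1:Int) ≤ 0 ∧ (0:Int) ≠ 0)), ← pv_out_false]
    · -- B < 0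
      by_cases hTge : 0 ≤ 1000 * W
      · rw [pv_alt_spec 0 B W 0 (min 999999 (PySem.Int.floordiv (1000*W) B)) true
              (by simp [pvStep1, pvStep2, show ¬ B > 0 by omega, show ¬ B = 0 by omega, hTge]),
            pv_search_eq 0 B W 0 (min 999999 (PySem.Int.floordiv (1000*W) B)) (le_refl _) (by omega)
              (by intro n hn hn'
                  rw [pv_neg_ceil_le_iff (1000*W) B n hB]
                  constructor
                  · rintro ⟨_, h⟩; exact ⟨hn, by omega⟩
                  · rintro ⟨_, h⟩; exact ⟨by simpa using hTge, by omega⟩),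
            pv_out_true]
      · rw [pv_alt_spec 0 B W 0 (min 999999 (PySem.Int.floordiv (1000*W) B)) false
              (by simp [pvStep1, pvStep2, show ¬ B > 0 by omega, show ¬ B = 0 by omega]; omega),
            pv_search_eq 0 B W 1 0 (by omega) (by omega)
              (by intro n hn hn'
                  constructor
                  · rintro ⟨h, _⟩; simp at h; omega
                  · rintro ⟨h1, h2⟩; omega),
            if_neg (by omega : ¬ ((1:Int) ≤ 0 ∧ (0:Int) ≠ 0)), ← pv_out_false]
  · -- A < 0
    rcases lt_trichotomy 0 B with hB | hB | hB
    · rw [pv_alt_spec A B W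
            (max (max 0 (-(PySem.Int.floordiv (-(1000*W)) A))) (-(PySem.Int.floordiv (-(1000*W)) B)))
            999999 true
            (by simp [pvStep1, pvStep2, show ¬ A > 0 by omega, show ¬ A = 0 by omega, hB]),
          pv_search_eq A B W (max (max 0 (-(PySem.Int.floordiv (-(1000*W)) A))) (-(PySem.Int.floordiv (-(1000*W)) B))) 999999 (by omega) (le_refl _)
            (by intro n hn hn'
                rw [pv_neg_le_floor_iff (1000*W) A n hA, pv_ceil_le_iff (1000*W) B n hB]
                omega),
          pv_out_true]
    · subst hB
      by_cases hTle : 1000 * W ≤ 0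
      · rw [pv_alt_spec A 0 W (max 0 (-(PySem.Int.floordiv (-(1000*W)) A))) 999999 true
              (by simp [pvStep1, pvStep2, show ¬ A > 0 by omega, show ¬ A = 0 by omega, hTle]),
            pv_search_eq A 0 W (max 0 (-(PySem.Int.floordiv (-(1000*W)) A))) 999999 (by omega) (le_refl _)
              (by intro n hn hn'
                  rw [pv_neg_le_floor_iff (1000*W) A n hA]
                  constructor
                  · rintro ⟨h, _⟩; exact ⟨by omega, by omega⟩
                  · rintro ⟨h, _⟩; exact ⟨by omega, by simpa using hTle⟩),
            pv_out_true]
      · rw [pv_alt_spec A 0 W (max 0 (-(PySem.Int.floordiv (-(1000*W)) A))) 999999 false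
              (by simp [pvStep1, pvStep2, show ¬ A > 0 by omega, show ¬ A = 0 by omega]; omega),
            pv_search_eq A 0 W 1 0 (by omega) (by omega)
              (by intro n hn hn'
                  constructor
                  · rintro ⟨_, h⟩; simp at h; omega
                  · rintro ⟨h1, h2⟩; omega),
            if_neg (by omega : ¬ ((1:Int) ≤ 0 ∧ (0:Int) ≠ 0)), ← pv_out_false]
    · -- B < 0
      rw [pv_alt_spec A B W (max 0 (-(PySem.Int.floordiv (-(1000*W)) A)))
            (min 999999 (PySem.Int.floordiv (1000*W) B)) true
            (by simp [pvStep1, pvStep2, show ¬ A > 0 by omega, show ¬ A = 0 by omega,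
                  show ¬ B > 0 by omega, show ¬ B = 0 by omega]),
          pv_search_eq A B W (max 0 (-(PySem.Int.floordiv (-(1000*W)) A))) (min 999999 (PySem.Int.floordiv (1000*W) B)) (by omega) (by omega)
            (by intro n hn hn'
                rw [pv_neg_le_floor_iff (1000*W) A n hA, pv_neg_ceil_le_iff (1000*W) B n hB]
                omega),
          pv_out_true]
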